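-- pv_equiv track=rewrite | github.com/tylwright/proxmox-to-obsidian | proxmox_to_obsidian.py | parse_ct_mountpoint
-- ===== SOURCE A (Python) =====
-- def parse_ct_mountpoint(key: str, value: str) -> dict | None:
--     """
--     Parse a container mountpoint config entry.
--     """
--     if key != "rootfs" and not key.startswith("mp"):
--         return None
--     if not isinstance(value, str):
--         return None
--
--     result = {"id": key, "volume": "N/A", "size": "N/A", "mp": "N/A"}
--     parts = value.split(",")
--     result["volume"] = parts[0]
--     for part in parts[1:]:
--         if part.startswith("size="):
--             result["size"] = part.split("=", 1)[1]
--         elif part.startswith("mp="):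
--             result["mp"] = part.split("=", 1)[1]
--
--     return result
-- ===== SOURCE B (Python) =====
-- def _last_opt(parts, prefix):
--     """Value of the last part starting with prefix, found by right-to-left scan."""
--     for p in reversed(parts):
--         if p.startswith(prefix):
--             return p[len(prefix):]
--     return "N/A"
--
--
-- def parse_ct_mountpoint(key: str, value: str) -> dict | None:
--     """
--     Parse a container mountpoint config entry.
--     """
--     if key != "rootfs" and not key.startswith("mp"):
--         return None
--     parts = value.split(",")
--     return {
--         "id": key,
--         "volume": parts[0],
--         "size": _last_opt(parts[1:], "size="),
--         "mp": _last_opt(parts[1:], "mp="),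
--     }
-- ===== Notes on version B (the rewrite author's own statement) =====
-- stated objective: alternative
-- what changed: Replaces A's single forward pass that mutates a pre-filled dict on startswith hits with two independent right-to-left early-exit searches (last match wins becomes first match from the end), reading the value by prefix-length slicing instead of split('=',1).
import Mathlib
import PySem

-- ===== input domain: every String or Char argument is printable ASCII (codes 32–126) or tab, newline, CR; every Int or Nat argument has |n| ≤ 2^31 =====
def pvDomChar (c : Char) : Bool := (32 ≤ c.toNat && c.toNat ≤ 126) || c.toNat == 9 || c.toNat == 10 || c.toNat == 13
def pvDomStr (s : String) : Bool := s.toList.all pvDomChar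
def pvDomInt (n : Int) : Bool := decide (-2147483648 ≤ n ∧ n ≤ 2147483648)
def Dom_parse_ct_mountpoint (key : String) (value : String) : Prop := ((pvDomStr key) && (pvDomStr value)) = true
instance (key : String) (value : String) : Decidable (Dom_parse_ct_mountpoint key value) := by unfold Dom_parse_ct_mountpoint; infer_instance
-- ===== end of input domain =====

-- B replaces A's forward pass that mutates a pre-filled dict with two independent
-- right-to-left early-exit searches (first match from the end = A's last overwrite),
-- slicing off the prefix instead of split('=',1) (alternative decomposition).

-- ===== PORT A =====
-- part.split("=",1)[1]; exact where it is used: the startswith guard guarantees '=' ∈ part,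
-- so the split has two pieces and index 1 is in range.
def pvTailEq (part : String) : String :=
  ((PySem.Str.splitMax? part "=" 1).getD []).getD 1 ""

def parse_ct_mountpoint (key : String) (value : String) : Option (List (String × String)) :=
  if !(key == "rootfs") && !(PySem.Str.startswith key "mp") then none
  else
    -- (the 'isinstance(value, str)' guard is always satisfied under the type convention)
    let result : PySem.Dict String String :=
      PySem.Dict.mk [("id", key), ("volume", "N/A"), ("size", "N/A"), ("mp", "N/A")]
    let parts := (PySem.Str.split? value ",").getD []
    let result := result.insert "volume" (parts.headD "")  -- parts[0]: split(',') never returns []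
    let result := (parts.drop 1).foldl (fun d part =>
      if PySem.Str.startswith part "size=" then d.insert "size" (pvTailEq part)
      else if PySem.Str.startswith part "mp=" then d.insert "mp" (pvTailEq part)
      else d) result
    some result.items

-- ===== PORT B =====
-- _last_opt's loop 'for p in reversed(parts)' with early return, as recursion on parts.reverse
def pvLastOptGo (pre : String) : List String → String
  | [] => "N/A"
  | p :: rest =>
    if PySem.Str.startswith p pre then
      PySem.Str.slice p (some ((pre.toList.length : Int))) none  -- p[len(prefix):]
    else pvLastOptGo pre rest

def pvLastOpt (parts : List String) (pre : String) : String :=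
  pvLastOptGo pre parts.reverse

def parse_ct_mountpoint_alt (key : String) (value : String) : Option (List (String × String)) :=
  if !(key == "rootfs") && !(PySem.Str.startswith key "mp") then none
  else
    let parts := (PySem.Str.split? value ",").getD []
    let tail := PySem.List.slice parts (some 1) none  -- parts[1:]
    some [("id", key), ("volume", parts.headD ""),
          ("size", pvLastOpt tail "size="), ("mp", pvLastOpt tail "mp=")]

-- ===== PRECONDITION & SPEC =====
def Spec_parse_ct_mountpoint (key : String) (value : String) (out : Option (List (String × String))) : Prop := out = parse_ct_mountpoint_alt key value
instance (key : String) (value : String) (out : Option (List (String × String))) : Decidable (Spec_parse_ct_mountpoint key value out) := by unfold Spec_parse_ct_mountpoint; infer_instance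

-- ===== CLAIM (what is proved, stated in full; the proofs are below) =====
def Claim_equal_parse_ct_mountpoint : Prop := ∀ (key : String) (value : String), Dom_parse_ct_mountpoint key value → Spec_parse_ct_mountpoint key value (parse_ct_mountpoint key value)

-- ===== LEMMAS AND PROOFS =====

theorem pvStrExt {s t : String} (h : s.toList = t.toList) : s = t := by
  have := congrArg String.ofList h
  simpa using this

-- With maxsplit budget 0, splitOnMax.go returns the remainder as the last piece.
theorem pvGo0 (fuel : Nat) (l cur : List Char) (acc : List (List Char)) :
    PySem.Chars.splitOnMax.go ['='] fuel 0 l cur acc = acc.reverse ++ [cur.reverse ++ l] := by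
  cases fuel <;> cases l <;> simp [PySem.Chars.splitOnMax.go]

theorem pvGo1 (l : List Char) : ∀ (fuel : Nat) (cur : List Char) (acc : List (List Char)),
    l.length < fuel →
    PySem.Chars.splitOnMax.go ['='] fuel 1 l cur acc =
      if '=' ∈ l then
        acc.reverse ++ [cur.reverse ++ l.takeWhile (· ≠ '='), (l.dropWhile (· ≠ '=')).tail]
      else acc.reverse ++ [cur.reverse ++ l] := by
  induction l with
  | nil =>
    intro fuel cur acc h
    cases fuel with
    | zero => omega
    | succ f => simp [PySem.Chars.splitOnMax.go]
  | cons c rest ih =>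
    intro fuel cur acc h
    cases fuel with
    | zero => omega
    | succ f =>
      by_cases hc : c = '='
      · subst hc
        simp [PySem.Chars.splitOnMax.go, List.isPrefixOf, pvGo0]
      · have step : PySem.Chars.splitOnMax.go ['='] (f+1) 1 (c :: rest) cur acc
             = PySem.Chars.splitOnMax.go ['='] f 1 rest (c :: cur) acc := by
          simp [PySem.Chars.splitOnMax.go, List.isPrefixOf, Ne.symm hc]
        rw [step, ih f (c :: cur) acc (by simpa using h)]
        by_cases hm : '=' ∈ rest <;> simp [hm, hc, eq_comm]

theorem pvSplitOnMax_mem (cs : List Char) (h : '=' ∈ cs) :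
    PySem.Chars.splitOnMax cs ['='] 1
      = [cs.takeWhile (· ≠ '='), (cs.dropWhile (· ≠ '=')).tail] := by
  rw [PySem.Chars.splitOnMax]
  simp [pvGo1 cs (cs.length + 1) [] [] (by omega), h]

theorem pvDw_append (k t : List Char) (hk : '=' ∉ k) :
    (k ++ '=' :: t).dropWhile (· ≠ '=') = '=' :: t := by
  induction k with
  | nil => simp
  | cons c rest ih =>
    simp at hk
    rw [List.cons_append, List.dropWhile_cons]
    have h2 := ih hk.2
    simp only [decide_not] at h2
    simp [Ne.symm hk.1, h2]

-- "size=" and "mp=" cannot both be prefixes of the same part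
theorem pvNotBoth (p : String) (h : PySem.Str.startswith p "size=" = true) :
    PySem.Str.startswith p "mp=" = false := by
  by_contra hcon
  have h2 : PySem.Str.startswith p "mp=" = true := by simpa using hcon
  rw [PySem.Str.startswith_eq] at h h2
  obtain ⟨t1, e1⟩ := (PySem.Chars.startswith_iff _ _).mp h
  obtain ⟨t2, e2⟩ := (PySem.Chars.startswith_iff _ _).mp h2
  have em : "mp=".toList = ['m', 'p', '='] := by decide
  have es : "size=".toList = ['s', 'i', 'z', 'e', '='] := by decide
  rw [← e1, em, es] at e2
  simp at e2

-- the last 'pre'-tagged value in l, or d: what A's fold computes for one key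
def pvLastVal (pre : String) (l : List String) (d : String) : String :=
  l.foldl (fun acc p => if PySem.Str.startswith p pre then pvTailEq p else acc) d

theorem pvA_loop (l : List String) : ∀ (k v s m : String),
    l.foldl (fun d part =>
      if PySem.Str.startswith part "size=" then d.insert "size" (pvTailEq part)
      else if PySem.Str.startswith part "mp=" then d.insert "mp" (pvTailEq part)
      else d) (PySem.Dict.mk [("id", k), ("volume", v), ("size", s), ("mp", m)])
    = PySem.Dict.mk [("id", k), ("volume", v),
        ("size", pvLastVal "size=" l s), ("mp", pvLastVal "mp=" l m)] := by
  induction l with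
  | nil => intro k v s m; simp [pvLastVal]
  | cons p rest ih =>
    intro k v s m
    rw [List.foldl_cons]
    have e1 : pvLastVal "size=" (p :: rest) s
        = pvLastVal "size=" rest (if PySem.Str.startswith p "size=" then pvTailEq p else s) := rfl
    have e2 : pvLastVal "mp=" (p :: rest) m
        = pvLastVal "mp=" rest (if PySem.Str.startswith p "mp=" then pvTailEq p else m) := rfl
    rw [e1, e2]
    by_cases h1 : PySem.Str.startswith p "size=" = true
    · have h2 := pvNotBoth p h1
      have hins : (PySem.Dict.mk [("id", k), ("volume", v), ("size", s), ("mp", m)]).insert "size" (pvTailEq p)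
          = PySem.Dict.mk [("id", k), ("volume", v), ("size", pvTailEq p), ("mp", m)] := by
        simp [PySem.Dict.insert, PySem.Dict.contains]
      simp only [h1, h2, if_true, Bool.false_eq_true, if_false, hins, ih]
    · by_cases h2 : PySem.Str.startswith p "mp=" = true
      · have hins : (PySem.Dict.mk [("id", k), ("volume", v), ("size", s), ("mp", m)]).insert "mp" (pvTailEq p)
            = PySem.Dict.mk [("id", k), ("volume", v), ("size", s), ("mp", pvTailEq p)] := by
          simp [PySem.Dict.insert, PySem.Dict.contains]
        simp only [h1, h2, if_true, Bool.false_eq_true, if_false, hins, ih]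
      · simp only [h1, h2, Bool.false_eq_true, if_false, ih]

theorem pvDropApp (k t' : List Char) : (k ++ t').drop (k.length + 1) = t'.drop 1 := by
  induction k with
  | nil => simp
  | cons c r ih => simp [ih]

-- when part startswith (k₀ ++ "="), split("=",1)[1] is exactly the prefix-stripping slice
theorem pvTailEq_slice (p pre k₀ : String) (hpre : pre.toList = k₀.toList ++ ['='])
    (hk : '=' ∉ k₀.toList) (h : PySem.Str.startswith p pre = true) :
    pvTailEq p = PySem.Str.slice p (some ((pre.toList.length : Int))) none := by
  rw [PySem.Str.startswith_eq] at h
  obtain ⟨t, e⟩ := (PySem.Chars.startswith_iff _ _).mp h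
  rw [hpre] at e
  have ep : p.toList = k₀.toList ++ '=' :: t := by rw [← e]; simp
  have hm : '=' ∈ p.toList := by rw [ep]; simp
  have hsplit : (PySem.Str.splitMax? p "=" 1).getD []
      = [String.ofList (p.toList.takeWhile (· ≠ '=')),
         String.ofList ((p.toList.dropWhile (· ≠ '=')).tail)] := by
    simp [PySem.Str.splitMax?, PySem.Chars.splitMax?,
          pvSplitOnMax_mem p.toList hm, String.ofList]
  apply pvStrExt
  have hlen : pre.toList.length = k₀.toList.length + 1 := by rw [hpre]; simp
  have hslice : (PySem.Str.slice p (some ((pre.toList.length : Int))) none).toList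
      = p.toList.drop pre.toList.length := by
    simp [PySem.List.slice_from_natCast]
  rw [hslice, ep, hlen]
  have hdrop : (k₀.toList ++ '=' :: t).drop (k₀.toList.length + 1) = t := by
    simpa using pvDropApp k₀.toList ('=' :: t)
  rw [hdrop]
  have hdw := pvDw_append k₀.toList t hk
  simp only [decide_not] at hdw
  simp [pvTailEq, hsplit, ep, hdw]

-- A's last-overwrite fold equals B's first-match-from-the-end scan
theorem pvLast_eq (pre k₀ : String) (hpre : pre.toList = k₀.toList ++ ['='])
    (hk : '=' ∉ k₀.toList) (l : List String) :
    pvLastVal pre l "N/A" = pvLastOptGo pre l.reverse := by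
  induction l using List.reverseRecOn with
  | nil => rfl
  | append_singleton l p ih =>
    rw [pvLastVal, List.foldl_append, List.reverse_append]
    simp only [List.reverse_cons, List.reverse_nil, List.nil_append, List.singleton_append,
      List.foldl_cons, List.foldl_nil, pvLastOptGo]
    by_cases h : PySem.Str.startswith p pre = true
    · rw [if_pos h, if_pos h]
      exact pvTailEq_slice p pre k₀ hpre hk h
    · rw [if_neg (by simpa using h), if_neg (by simpa using h)]
      exact ih

-- ===== VERDICT (by name: the statement is the Claim_ definition above) =====
theorem parse_ct_mountpoint_spec : Claim_equal_parse_ct_mountpoint := by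
  intro key value _
  unfold Spec_parse_ct_mountpoint parse_ct_mountpoint parse_ct_mountpoint_alt
  by_cases hg : (!(key == "rootfs") && !(PySem.Str.startswith key "mp")) = true
  · rw [if_pos hg, if_pos hg]
  · rw [if_neg hg, if_neg hg]
    have hins : (PySem.Dict.mk [("id", key), ("volume", "N/A"), ("size", "N/A"), ("mp", "N/A")]).insert
          "volume" (((PySem.Str.split? value ",").getD []).headD "")
        = PySem.Dict.mk [("id", key), ("volume", ((PySem.Str.split? value ",").getD []).headD ""),
            ("size", "N/A"), ("mp", "N/A")] := by
      simp [PySem.Dict.insert, PySem.Dict.contains]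
    have htail : PySem.List.slice ((PySem.Str.split? value ",").getD []) (some 1) none
        = ((PySem.Str.split? value ",").getD []).drop 1 := by
      rw [PySem.List.slice_from_one, List.drop_one]
    simp only [hins, pvA_loop, htail, pvLastOpt,
        pvLast_eq "size=" "size" (by decide) (by decide),
        pvLast_eq "mp=" "mp" (by decide) (by decide)]
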